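-- pv_equiv track=rewrite | github.com/pwmcclung/codeProbs | count_amazon.py | count_arara
-- ===== SOURCE A (Python) =====
-- def count_arara(n):
--     odd = 'anane'
--     even = 'adak'
--     count_arr = []
--     if n > 0:
--         for i in range(1, n+1):
--             if i % 2 == 0:
--                 count_arr.append(even)
--             if i % 2 != 0 and i == n:
--                 count_arr.append(odd)
--     return ' '.join(count_arr)
-- ===== SOURCE B (Python) =====
-- def count_arara(n):
--     parts = ['adak'] * (n // 2)
--     if n > 0 and n % 2 == 1:
--         parts.append('anane')
--     return ' '.join(parts)
-- ===== Notes on version B (the rewrite author's own statement) =====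
-- stated objective: simpler
-- what changed: Replaces the per-index loop and parity tests with a closed form: half as many copies of 'adak' built by list replication plus a guarded trailing 'anane', then one join.
import Mathlib
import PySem

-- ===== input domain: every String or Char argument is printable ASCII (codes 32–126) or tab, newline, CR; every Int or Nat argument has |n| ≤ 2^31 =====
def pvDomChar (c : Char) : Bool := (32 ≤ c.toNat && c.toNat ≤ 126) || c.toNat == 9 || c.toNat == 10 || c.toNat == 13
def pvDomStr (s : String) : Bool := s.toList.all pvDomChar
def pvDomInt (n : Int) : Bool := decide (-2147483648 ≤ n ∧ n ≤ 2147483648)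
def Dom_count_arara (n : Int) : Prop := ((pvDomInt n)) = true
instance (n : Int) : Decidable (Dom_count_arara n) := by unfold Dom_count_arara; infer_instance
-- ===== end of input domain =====

-- B computes the same string in closed form (replicate + guarded append) instead of A's per-index loop; objective: simpler.
-- ===== PORT A =====
def count_arara (n : Int) : String :=
  let odd := "anane"
  let even := "adak"
  let count_arr : List String := []
  let count_arr :=
    if n > 0 then
      (PySem.List.pyRange 1 (n + 1) 1).foldl (fun acc i =>
        let acc := if PySem.Int.mod i 2 = 0 then acc ++ [even] else acc
        if PySem.Int.mod i 2 ≠ 0 ∧ i = n then acc ++ [odd] else acc) count_arr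
    else count_arr
  PySem.Str.join " " count_arr

-- ===== PORT B =====
def count_arara_alt (n : Int) : String :=
  let parts := List.replicate (PySem.Int.floordiv n 2).toNat "adak"
  let parts := if n > 0 ∧ PySem.Int.mod n 2 = 1 then parts ++ ["anane"] else parts
  PySem.Str.join " " parts

-- ===== PRECONDITION & SPEC =====
def Spec_count_arara (n : Int) (out : String) : Prop := out = count_arara_alt n
instance (n : Int) (out : String) : Decidable (Spec_count_arara n out) := by unfold Spec_count_arara; infer_instance

-- ===== CLAIM (what is proved, stated in full; the proofs are below) =====
def Claim_equal_count_arara : Prop := ∀ (n : Int), Dom_count_arara n → Spec_count_arara n (count_arara n)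

-- ===== LEMMAS AND PROOFS =====

-- The even-only part of A's loop over range(1, m) appends one 'adak' per even index.
theorem evenfold (k : Nat) (init : List String) :
    (PySem.List.pyRange 1 (1 + (k : Int)) 1).foldl
      (fun acc i => if PySem.Int.mod i 2 = 0 then acc ++ ["adak"] else acc) init
    = init ++ List.replicate (k / 2) "adak" := by
  induction k generalizing init with
  | zero =>
    rw [show (1 + ((0 : Nat) : Int)) = 1 by norm_num,
        PySem.List.pyRange_one_eq_nil (by omega)]
    simp
  | succ k ih =>
    rw [show (1 + ((k + 1 : Nat) : Int)) = (1 + (k : Int)) + 1 by push_cast; ring,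
        PySem.List.pyRange_one_succ_right (by omega), List.foldl_append, ih]
    simp only [List.foldl_cons, List.foldl_nil]
    rw [PySem.Int.mod_eq_emod_of_pos (by omega)]
    by_cases he : (1 + (k : Int)) % 2 = 0
    · rw [if_pos he]
      have hk : (k + 1) / 2 = k / 2 + 1 := by omega
      rw [hk, List.append_assoc]
      congr 1
      rw [List.replicate_succ']
    · rw [if_neg he]
      have hk : (k + 1) / 2 = k / 2 := by omega
      rw [hk]

-- ===== VERDICT (by name: the statement is the Claim_ definition above) =====
theorem count_arara_spec : Claim_equal_count_arara := by
  intro n _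
  unfold Spec_count_arara count_arara count_arara_alt
  dsimp only
  by_cases hn : n > 0
  · rw [if_pos hn]
    obtain ⟨k, rfl⟩ : ∃ k : Nat, n = (k : Int) + 1 := ⟨(n - 1).toNat, by omega⟩
    rw [PySem.List.pyRange_one_succ_right (by omega), List.foldl_append]
    have hcongr :
        (PySem.List.pyRange 1 ((k : Int) + 1) 1).foldl
          (fun acc i =>
            have acc := if PySem.Int.mod i 2 = 0 then acc ++ ["adak"] else acc;
            if PySem.Int.mod i 2 ≠ 0 ∧ i = (k : Int) + 1 then acc ++ ["anane"] else acc)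
          ([] : List String)
        = (PySem.List.pyRange 1 ((k : Int) + 1) 1).foldl
            (fun acc i => if PySem.Int.mod i 2 = 0 then acc ++ ["adak"] else acc)
            ([] : List String) := by
      apply PySem.List.foldl_congr_mem
      intro acc x hx
      have hx' := (PySem.List.mem_pyRange_one).mp hx
      have hne : x ≠ (k : Int) + 1 := by omega
      simp [hne]
    rw [hcongr, show ((k : Int) + 1) = 1 + (k : Int) from by ring, evenfold k []]
    simp only [List.nil_append, List.foldl_cons, List.foldl_nil]
    rw [show (1 + (k : Int)) = (k : Int) + 1 from by ring]
    simp only [PySem.Int.mod_eq_emod_of_pos (show (0:Int) < 2 by omega),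
      PySem.Int.floordiv_eq_ediv_of_pos (show (0:Int) < 2 by omega)]
    by_cases hpar : ((k : Int) + 1) % 2 = 0
    · have h1 : ¬((k : Int) + 1) % 2 = 1 := by omega
      have h2 : (((k : Int) + 1) / 2).toNat = k / 2 + 1 := by omega
      simp [hpar, h2, List.replicate_succ']
    · have hone : ((k : Int) + 1) % 2 = 1 := by omega
      have h2 : (((k : Int) + 1) / 2).toNat = k / 2 := by omega
      simp [hone, h2, show (0:Int) < (k:Int) + 1 by omega]
  · rw [if_neg hn]
    have h2 : (PySem.Int.floordiv n 2).toNat = 0 := by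
      rw [PySem.Int.floordiv_eq_ediv_of_pos (by omega)]
      omega
    rw [if_neg (by intro h; exact hn h.1), h2]
    simp
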